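-- pv_equiv track=rewrite | github.com/github-lily/AlgorithmSolve | 백준/Silver/2805. 나무 자르기/나무 자르기.py | solution
-- ===== SOURCE A (Python) =====
-- def solution(k,trees) :
--
--     lo = 0
--     hi = max(trees)
--     mx = 0
--
--     while lo+1 < hi :
--         mid = (lo + hi)//2
--         amount = cutting(trees,mid)
--
--         if amount >= k :
--             lo = mid
--             if mx < mid :
--                 mx = mid
--
--         else :
--             hi = mid
--
--     return mx
--
-- def cutting(trees,h) :
--     amount = 0
--     for t,n in trees.items() :
--         if t>h :
--             amount += (t-h)*n
--     return amount
-- ===== SOURCE B (Python) =====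
-- # Alternative: sort once + suffix sums answer each probe by bisection, and the
-- # interval search itself runs as a fixed-count for-loop (bit_length of the range)
-- # over a pure step function instead of A's while-loop with a rescan of all trees.
-- def _bisect_right(hs, x):
--     i_lo, i_hi = 0, len(hs)
--     while i_lo < i_hi:
--         i_mid = (i_lo + i_hi) // 2
--         if x < hs[i_mid]:
--             i_hi = i_mid
--         else:
--             i_lo = i_mid + 1
--     return i_lo
--
-- def _step(k, hs, suf_n, suf_tn, lo, hi):
--     if lo + 1 < hi:
--         mid = (lo + hi) // 2
--         i = _bisect_right(hs, mid)
--         if suf_tn[i] - mid * suf_n[i] >= k: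
--             return mid, hi
--         return lo, mid
--     return lo, hi
--
-- def solution(k, trees):
--     items = sorted(trees.items(), key=lambda p: p[0])
--     hs = [t for t, _ in items]
--     suf_n = [0]
--     suf_tn = [0]
--     for t, n in reversed(items):
--         suf_n.append(suf_n[-1] + n)
--         suf_tn.append(suf_tn[-1] + t * n)
--     suf_n.reverse()
--     suf_tn.reverse()
--     lo, hi = 0, max(trees)
--     for _ in range((hi - 1).bit_length()):
--         lo, hi = _step(k, hs, suf_n, suf_tn, lo, hi)
--     return lo
-- ===== Notes on version B (the rewrite author's own statement) =====
-- stated objective: alternative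
-- what changed: B sorts the trees once and precomputes suffix sums of count and height*count so each probe is answered by bisecting the sorted heights instead of A's rescan of every tree, and it replaces A's while-loop (with its redundant mx accumulator) by a fixed-count for-loop of bit_length(hi-1) applications of a pure (lo,hi) step function.
import Mathlib
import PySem

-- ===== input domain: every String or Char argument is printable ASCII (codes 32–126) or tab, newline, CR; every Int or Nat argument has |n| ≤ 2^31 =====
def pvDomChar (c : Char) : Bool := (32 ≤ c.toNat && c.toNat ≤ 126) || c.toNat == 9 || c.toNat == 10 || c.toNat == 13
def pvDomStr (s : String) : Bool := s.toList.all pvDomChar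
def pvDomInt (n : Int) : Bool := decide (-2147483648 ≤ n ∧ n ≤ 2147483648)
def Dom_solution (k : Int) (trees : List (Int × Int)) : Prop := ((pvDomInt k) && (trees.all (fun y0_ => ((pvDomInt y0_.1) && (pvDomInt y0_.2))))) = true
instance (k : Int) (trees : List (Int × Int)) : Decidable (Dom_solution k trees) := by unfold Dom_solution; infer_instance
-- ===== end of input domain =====

-- B sorts once and answers each probe from suffix sums via a bisection of the sorted
-- heights, and runs the interval search as a fixed-count fold of a pure step function
-- instead of A's while-loop that rescans every tree (objective: alternative).

-- ===== PORT A =====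
-- cutting(trees, h): for t, n in trees.items(): if t > h: amount += (t - h) * n
def cutting (trees : List (Int × Int)) (h : Int) : Int :=
  trees.foldl (fun amount p => if p.1 > h then amount + (p.1 - h) * p.2 else amount) 0

-- A's while-loop over the state (lo, hi, mx).  The Nat fuel only makes the
-- recursion structural (each pass shrinks hi - lo by at least 1, and the initial
-- fuel is (hi - lo).toNat, so it is never exhausted); the body is A's loop body.
def solutionLoop (k : Int) (trees : List (Int × Int)) : Nat → Int → Int → Int → Int
  | 0, _, _, mx => mx
  | fuel + 1, lo, hi, mx =>
    if lo + 1 < hi then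
      let mid := PySem.Int.floordiv (lo + hi) 2
      let amount := cutting trees mid
      if amount ≥ k then
        solutionLoop k trees fuel mid hi (if mx < mid then mid else mx)
      else
        solutionLoop k trees fuel lo mid mx
    else mx

def solution (k : Int) (trees : List (Int × Int)) : Int :=
  -- hi = max(trees): Python's max over the dict's keys (ValueError on an empty dict → Pre_)
  let hi := (PySem.List.max? (trees.map Prod.fst) (fun x => x)).getD 0
  solutionLoop k trees hi.toNat 0 hi 0

-- ===== PORT B =====
-- Source B builds suf_n / suf_tn by appending the running sums while scanning
-- reversed(items) and then reversing; building the (already reversed) lists by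
-- consing from the right end of items is List.foldr — the running sum is the head.
def sufBuild (items : List (Int × Int)) : List Int × List Int :=
  items.foldr
    (fun (p : Int × Int) (acc : List Int × List Int) =>
      ((p.2 + acc.1.headD 0) :: acc.1, (p.1 * p.2 + acc.2.headD 0) :: acc.2))
    ([0], [0])

-- Source B's _step: one pure transformation of (lo, hi); its helper _bisect_right is
-- verbatim the stdlib bisect.bisect_right, whose PySem port is PySem.List.bisectRight.
-- suf_tn[i] / suf_n[i]: i = bisect_right(hs, mid) ≤ len(hs) < len(suf_n), so the
-- index is always in range and List.getD is exact here.
def stepB (k : Int) (hs sufN sufTN : List Int) (st : Int × Int) : Int × Int :=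
  if st.1 + 1 < st.2 then
    let mid := PySem.Int.floordiv (st.1 + st.2) 2
    let i := PySem.List.bisectRight hs mid
    if sufTN.getD i 0 - mid * sufN.getD i 0 ≥ k then (mid, st.2) else (st.1, mid)
  else st

-- (hi - 1).bit_length(): Python's int.bit_length is the bit count of |n|
def bitLength (x : Int) : Nat := Nat.size x.natAbs

def solution_alt (k : Int) (trees : List (Int × Int)) : Int :=
  let items := PySem.List.sorted trees Prod.fst          -- sorted(trees.items(), key=λp: p[0])
  let s := sufBuild items
  let hs := items.map Prod.fst                           -- hs = [t for t, _ in items]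
  let hi := (PySem.List.max? (trees.map Prod.fst) (fun x => x)).getD 0   -- max(trees)
  -- for _ in range((hi-1).bit_length()): lo, hi = _step(...)
  ((PySem.List.pyRange 0 (bitLength (hi - 1) : Int) 1).foldl
      (fun st _ => stepB k hs s.1 s.2 st) (0, hi)).1

-- ===== PRECONDITION & SPEC =====
-- Python A raises ValueError on max(trees) when the dict is empty; that is all Pre_ excludes.
def Pre_solution (k : Int) (trees : List (Int × Int)) : Prop := trees ≠ []
instance (k : Int) (trees : List (Int × Int)) : Decidable (Pre_solution k trees) := by
  unfold Pre_solution; infer_instance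

def pvWitness_solution : Int × (List (Int × Int)) := (2, [(5, 1), (3, 2)])

def Spec_solution (k : Int) (trees : List (Int × Int)) (out : Int) : Prop := out = solution_alt k trees
instance (k : Int) (trees : List (Int × Int)) (out : Int) : Decidable (Spec_solution k trees out) := by
  unfold Spec_solution; infer_instance

-- ===== CLAIM (what is proved, stated in full; the proofs are below) =====
def Claim_equal_solution : Prop := ∀ (k : Int) (trees : List (Int × Int)), Dom_solution k trees → Pre_solution k trees → Spec_solution k trees (solution k trees)

-- ===== LEMMAS AND PROOFS =====

theorem cutting_foldl (trees : List (Int × Int)) (h : Int) : ∀ acc : Int,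
    trees.foldl (fun amount p => if p.1 > h then amount + (p.1 - h) * p.2 else amount) acc
      = acc + (trees.map fun p => if p.1 > h then (p.1 - h) * p.2 else 0).sum := by
  induction trees with
  | nil => simp
  | cons p t ih =>
    intro acc
    simp only [List.foldl_cons, List.map_cons, List.sum_cons, ih]
    split <;> ring

theorem cutting_eq_sum (trees : List (Int × Int)) (h : Int) :
    cutting trees h = (trees.map fun p => if p.1 > h then (p.1 - h) * p.2 else 0).sum := by
  simpa using cutting_foldl trees h 0

theorem sufBuild_fst_getD (l : List (Int × Int)) : ∀ (i : Nat),
    (sufBuild l).1.getD i 0 = ((l.drop i).map Prod.snd).sum := by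
  induction l with
  | nil => intro i; cases i <;> simp [sufBuild]
  | cons p t ih =>
    intro i
    cases i with
    | zero =>
      have h0 := ih 0
      simp only [sufBuild, List.foldr_cons] at *
      set X := (t.foldr
        (fun (p : Int × Int) (acc : List Int × List Int) =>
          ((p.2 + acc.1.headD 0) :: acc.1, (p.1 * p.2 + acc.2.headD 0) :: acc.2))
        ([0], [0])).1 with hX
      have hx : X.headD 0 = X.getD 0 0 := by cases X <;> rfl
      simp only [List.getD_cons_zero, List.drop_zero, List.map_cons, List.sum_cons, hx, h0]
    | succ j =>
      have := ih j
      simp only [sufBuild, List.foldr_cons] at *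
      simpa using this

theorem sufBuild_snd_getD (l : List (Int × Int)) : ∀ (i : Nat),
    (sufBuild l).2.getD i 0 = ((l.drop i).map (fun p => p.1 * p.2)).sum := by
  induction l with
  | nil => intro i; cases i <;> simp [sufBuild]
  | cons p t ih =>
    intro i
    cases i with
    | zero =>
      have h0 := ih 0
      simp only [sufBuild, List.foldr_cons] at *
      set X := (t.foldr
        (fun (p : Int × Int) (acc : List Int × List Int) =>
          ((p.2 + acc.1.headD 0) :: acc.1, (p.1 * p.2 + acc.2.headD 0) :: acc.2))
        ([0], [0])).2 with hX
      have hx : X.headD 0 = X.getD 0 0 := by cases X <;> rfl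
      simp only [List.getD_cons_zero, List.drop_zero, List.map_cons, List.sum_cons, hx, h0]
    | succ j =>
      have := ih j
      simp only [sufBuild, List.foldr_cons] at *
      simpa using this

theorem sum_sub_eq (l : List (Int × Int)) (h : Int) :
    (l.map fun p => (p.1 - h) * p.2).sum
      = (l.map fun p => p.1 * p.2).sum - h * (l.map Prod.snd).sum := by
  induction l with
  | nil => simp
  | cons p t ih => simp only [List.map_cons, List.sum_cons, ih]; ring

theorem cut_eq (trees : List (Int × Int)) (h : Int) :
    (sufBuild (PySem.List.sorted trees Prod.fst)).2.getD
        (PySem.List.bisectRight ((PySem.List.sorted trees Prod.fst).map Prod.fst) h) 0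
      - h * (sufBuild (PySem.List.sorted trees Prod.fst)).1.getD
        (PySem.List.bisectRight ((PySem.List.sorted trees Prod.fst).map Prod.fst) h) 0
    = cutting trees h := by
  set items := PySem.List.sorted trees Prod.fst with hitems
  set hs := items.map Prod.fst with hhs
  have hsort : hs.Pairwise (· ≤ ·) := PySem.List.sorted_map_key_pairwise trees Prod.fst
  obtain ⟨hle, hlo, hhi⟩ := PySem.List.bisectRight_spec hs h hsort
  set i := PySem.List.bisectRight hs h with hi
  have hlen : hs.length = items.length := by simp [hhs]
  -- every item in take i has height ≤ h
  have htake : ∀ p ∈ items.take i, ¬ p.1 > h := by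
    intro p hp
    obtain ⟨j, hj, hget⟩ := List.getElem_of_mem hp
    have hj1 : j < i := lt_of_lt_of_le hj (by simp [List.length_take])
    have hj2 : j < items.length := by
      have := List.length_take_le i items; omega
    have : hs[j]'(by omega) = p.1 := by
      simp only [hhs, List.getElem_map]
      rw [← List.getElem_take (xs := items) (j := i) (h := hj), hget]
    have := hlo j (by omega) hj1
    omega
  -- every item in drop i has height > h
  have hdrop : ∀ p ∈ items.drop i, p.1 > h := by
    intro p hp
    obtain ⟨j, hj, hget⟩ := List.getElem_of_mem hp
    have hj2 : i + j < items.length := by simp [List.length_drop] at hj; omega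
    have : hs[i + j]'(by omega) = p.1 := by
      simp only [hhs, List.getElem_map]
      rw [← List.getElem_drop (xs := items) (i := i) (h := hj), hget]
    have := hhi (i + j) (by omega) (by omega)
    omega
  rw [sufBuild_fst_getD, sufBuild_snd_getD, ← sum_sub_eq, cutting_eq_sum]
  -- sum over trees = sum over the sorted permutation
  have hperm : ((PySem.List.sorted trees Prod.fst).map
      fun p => if p.1 > h then (p.1 - h) * p.2 else 0).sum
      = (trees.map fun p => if p.1 > h then (p.1 - h) * p.2 else 0).sum :=
    List.Perm.sum_eq (List.Perm.map _ (PySem.List.sorted_perm trees Prod.fst false))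
  rw [← hperm, ← hitems]
  -- split items into take i ++ drop i
  conv_rhs => rw [← List.take_append_drop i items]
  rw [List.map_append, List.sum_append]
  have hz : ((items.take i).map fun p => if p.1 > h then (p.1 - h) * p.2 else 0).sum = 0 := by
    apply List.sum_eq_zero
    intro x hx
    obtain ⟨p, hp, rfl⟩ := List.mem_map.mp hx
    simp [htake p hp]
  have hd : ((items.drop i).map fun p => if p.1 > h then (p.1 - h) * p.2 else 0)
      = (items.drop i).map fun p => (p.1 - h) * p.2 := by
    apply List.map_congr_left
    intro p hp
    simp [hdrop p hp]
  rw [hz, hd, zero_add]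

-- a fold that ignores the elements is an iterate of the step, counted by the length
theorem foldl_const_iterate {α β : Type} (f : α → α) :
    ∀ (l : List β) (init : α),
      l.foldl (fun st _ => f st) init = f^[l.length] init := by
  intro l
  induction l with
  | nil => intro init; rfl
  | cons b t ih =>
    intro init
    simp only [List.foldl_cons, List.length_cons, Function.iterate_succ_apply, ih]

-- once the interval has converged the step is the identity
theorem stepB_converged (k : Int) (hs sufN sufTN : List Int) :
    ∀ (n : Nat) (lo hi : Int), ¬ lo + 1 < hi →
      (stepB k hs sufN sufTN)^[n] (lo, hi) = (lo, hi) := by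
  intro n
  induction n with
  | zero => intro lo hi _; rfl
  | succ m ih =>
    intro lo hi hge
    rw [Function.iterate_succ_apply]
    have : stepB k hs sufN sufTN (lo, hi) = (lo, hi) := by
      unfold stepB; simp [hge]
    rw [this]; exact ih lo hi hge

-- once converged, A's loop returns mx whatever fuel is left
theorem solutionLoop_converged (k : Int) (trees : List (Int × Int)) :
    ∀ (fuel : Nat) (lo hi mx : Int), ¬ lo + 1 < hi →
      solutionLoop k trees fuel lo hi mx = mx := by
  intro fuel lo hi mx hge
  cases fuel with
  | zero => rfl
  | succ m => simp [solutionLoop, hge]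

theorem iterate_eq_loop (k : Int) (trees : List (Int × Int)) (hs sufN sufTN : List Int)
    (hcut : ∀ h, sufTN.getD (PySem.List.bisectRight hs h) 0
        - h * sufN.getD (PySem.List.bisectRight hs h) 0 = cutting trees h) :
    ∀ (n : Nat) (fuel : Nat) (lo hi mx : Int),
      hi - lo ≤ 2 ^ n → hi - lo ≤ (fuel : Int) → mx = lo →
      ((stepB k hs sufN sufTN)^[n] (lo, hi)).1 = solutionLoop k trees fuel lo hi mx := by
  intro n
  induction n with
  | zero =>
    intro fuel lo hi mx hn hf hmx
    have hlt : ¬ lo + 1 < hi := by simp at hn; omega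
    rw [solutionLoop_converged k trees fuel lo hi mx hlt]
    simp [hmx]
  | succ m ih =>
    intro fuel lo hi mx hn hf hmx
    rw [Function.iterate_succ_apply]
    by_cases hlt : lo + 1 < hi
    · obtain ⟨f, rfl⟩ : ∃ f, fuel = f + 1 := by
        cases fuel with
        | zero => exfalso; simp at hf; omega
        | succ f => exact ⟨f, rfl⟩
      rw [solutionLoop]
      simp only [if_pos hlt]
      have h2 : PySem.Int.floordiv (lo + hi) 2 = (lo + hi) / 2 :=
        PySem.Int.floordiv_eq_ediv_of_pos (by norm_num)
      have hpow : (2 : Int) ^ (m + 1) = 2 * 2 ^ m := by ring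
      have hstep : stepB k hs sufN sufTN (lo, hi) =
          if cutting trees (PySem.Int.floordiv (lo + hi) 2) ≥ k
          then (PySem.Int.floordiv (lo + hi) 2, hi)
          else (lo, PySem.Int.floordiv (lo + hi) 2) := by
        unfold stepB
        simp only [hlt, if_pos, hcut (PySem.Int.floordiv (lo + hi) 2)]
      rw [hstep]
      by_cases hk : cutting trees (PySem.Int.floordiv (lo + hi) 2) ≥ k
      · rw [if_pos hk, if_pos hk]
        have hmm : (if mx < PySem.Int.floordiv (lo + hi) 2 then PySem.Int.floordiv (lo + hi) 2 else mx)
            = PySem.Int.floordiv (lo + hi) 2 := by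
          rw [hmx]; exact if_pos (by rw [h2]; omega)
        rw [hmm]
        exact ih f (PySem.Int.floordiv (lo + hi) 2) hi _
          (by rw [h2] at *; omega) (by push_cast at hf ⊢; rw [h2] at *; omega) rfl
      · rw [if_neg hk, if_neg hk]
        exact ih f lo (PySem.Int.floordiv (lo + hi) 2) mx
          (by rw [h2] at *; omega) (by push_cast at hf ⊢; rw [h2] at *; omega) hmx
    · rw [show stepB k hs sufN sufTN (lo, hi) = (lo, hi) by unfold stepB; simp [hlt]]
      rw [stepB_converged k hs sufN sufTN m lo hi hlt]
      rw [solutionLoop_converged k trees fuel lo hi mx hlt]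
      simp [hmx]

-- the fuel (hi-1).bit_length() makes the interval [0, hi] fit under 2 ^ fuel
theorem fuel_sufficient (hi : Int) (h2 : 2 ≤ hi) : hi ≤ 2 ^ bitLength (hi - 1) := by
  unfold bitLength
  have h1 : ((hi - 1).natAbs : Int) = hi - 1 := Int.natAbs_of_nonneg (by omega)
  have := Nat.lt_size_self (hi - 1).natAbs
  have : ((hi - 1).natAbs : Int) < ((2 ^ Nat.size (hi - 1).natAbs : Nat) : Int) := by
    exact_mod_cast this
  rw [h1] at this
  push_cast at this ⊢
  omega

-- ===== VERDICT (by name: the statement is the Claim_ definition above) =====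
theorem solution_spec : Claim_equal_solution := by
  intro k trees _ _
  unfold Spec_solution solution solution_alt
  set hi := (PySem.List.max? (trees.map Prod.fst) (fun x => x)).getD 0 with hhi
  simp only [foldl_const_iterate, PySem.List.length_pyRange_one]
  by_cases hbig : 2 ≤ hi
  · exact (iterate_eq_loop k trees _ _ _ (cut_eq trees)
      ((bitLength (hi - 1) : Int) - 0).toNat hi.toNat 0 hi 0
      (by
        have := fuel_sufficient hi hbig
        have hn : ((bitLength (hi - 1) : Int) - 0).toNat = bitLength (hi - 1) := by omega
        rw [hn]; omega)
      (by omega) rfl).symm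
  · have hlt : ¬ (0 : Int) + 1 < hi := by omega
    rw [stepB_converged _ _ _ _ _ _ _ hlt]
    rw [solutionLoop_converged k trees hi.toNat 0 hi 0 hlt]
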